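-- pv_equiv track=rewrite | github.com/markbeep/Lecturfier | cogs/help.py | sort_by_dict_size
-- ===== SOURCE A (Python) =====
-- def sort_by_dict_size(inp):
--     d = {}
--     for key in inp:
--         d[key] = len(inp[key])
--     d = {k: d[k] for k in sorted(d, key=d.get, reverse=True)}
--     sort = {}
--     for key in d:
--         sort[key] = inp[key]
--     return sort
-- ===== SOURCE B (Python) =====
-- def sort_by_dict_size(inp):
--     # Counting/bucket sort on value length instead of a comparison sort.
--     buckets = {}
--     for key, val in inp.items():
--         buckets.setdefault(len(val), []).append(key)
--     top = max(buckets, default=-1)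
--     out = {}
--     for n in range(top, -1, -1):
--         for key in buckets.get(n, []):
--             out[key] = inp[key]
--     return out
-- ===== Notes on version B (the rewrite author's own statement) =====
-- stated objective: alternative
-- what changed: Replaces the stable reverse=True comparison sort over keys by a counting/bucket sort: keys are grouped into buckets indexed by len(value) in one pass, then emitted by walking bucket indices from the maximum length down to 0, preserving insertion order within each bucket.
import Mathlib
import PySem

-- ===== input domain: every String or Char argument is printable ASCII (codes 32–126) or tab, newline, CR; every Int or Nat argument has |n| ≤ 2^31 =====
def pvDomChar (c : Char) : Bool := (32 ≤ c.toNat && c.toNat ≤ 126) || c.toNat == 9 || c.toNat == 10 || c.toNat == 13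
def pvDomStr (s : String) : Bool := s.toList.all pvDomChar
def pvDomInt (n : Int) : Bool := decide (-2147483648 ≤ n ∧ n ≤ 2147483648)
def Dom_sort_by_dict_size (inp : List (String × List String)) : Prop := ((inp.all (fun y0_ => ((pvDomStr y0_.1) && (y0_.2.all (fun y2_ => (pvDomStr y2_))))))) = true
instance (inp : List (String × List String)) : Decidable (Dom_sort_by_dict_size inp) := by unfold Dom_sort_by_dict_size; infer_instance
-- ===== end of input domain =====

-- B replaces A's stable comparison sort (sorted by value-list length, reverse=True) by a
-- counting/bucket sort on the length: a genuinely different algorithm with equal output.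

-- ===== PORT A =====
-- The dict parameter arrives as an association list; `PySem.Dict.ofList` is the dict it denotes.
def sort_by_dict_size (inp0 : List (String × List String)) : List (String × List String) :=
  let inp : PySem.Dict String (List String) := PySem.Dict.ofList inp0
  -- d = {}; for key in inp: d[key] = len(inp[key])
  let d : PySem.Dict String Int :=
    inp.keys.foldl (fun d key => d.insert key ((inp.getD key []).length : Int)) PySem.Dict.empty
  -- d = {k: d[k] for k in sorted(d, key=d.get, reverse=True)}
  -- (d.get k is the stored Int for every key of d; ported as getD with default 0, exact here)
  let d2 : PySem.Dict String Int :=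
    (PySem.List.sorted d.keys (fun k => d.getD k 0) true).foldl
      (fun acc k => acc.insert k (d.getD k 0)) PySem.Dict.empty
  -- sort = {}; for key in d: sort[key] = inp[key]
  let sort : PySem.Dict String (List String) :=
    d2.keys.foldl (fun s key => s.insert key (inp.getD key [])) PySem.Dict.empty
  sort.items

-- ===== PORT B =====
def sort_by_dict_size_alt (inp0 : List (String × List String)) : List (String × List String) :=
  let inp : PySem.Dict String (List String) := PySem.Dict.ofList inp0
  -- buckets = {}; for key, val in inp.items(): buckets.setdefault(len(val), []).append(key)
  let buckets : PySem.Dict Int (List String) :=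
    inp.items.foldl (fun b kv => b.modify ((kv.2.length : Int)) [] (fun l => l ++ [kv.1]))
      PySem.Dict.empty
  -- top = max(buckets, default=-1)
  let top : Int := PySem.List.maxD buckets.keys (fun n => n) (-1)
  -- out = {}; for n in range(top, -1, -1): for key in buckets.get(n, []): out[key] = inp[key]
  let out : PySem.Dict String (List String) :=
    (PySem.List.pyRange top (-1) (-1)).foldl
      (fun o n => (buckets.getD n []).foldl (fun o key => o.insert key (inp.getD key [])) o)
      PySem.Dict.empty
  out.items

-- ===== PRECONDITION & SPEC =====
def Spec_sort_by_dict_size (inp : List (String × List String)) (out : List (String × List String)) : Prop := out = sort_by_dict_size_alt inp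
instance (inp : List (String × List String)) (out : List (String × List String)) : Decidable (Spec_sort_by_dict_size inp out) := by unfold Spec_sort_by_dict_size; infer_instance

-- ===== CLAIM (what is proved, stated in full; the proofs are below) =====
def Claim_equal_sort_by_dict_size : Prop := ∀ (inp : List (String × List String)), Dom_sort_by_dict_size inp → Spec_sort_by_dict_size inp (sort_by_dict_size inp)

-- ===== LEMMAS AND PROOFS =====

theorem insertBy_pairwise_desc {α : Type} (g : α → Int) (x : α) (l : List α)
    (h : l.Pairwise (fun a b => g b ≤ g a)) :
    (PySem.List.insertBy (fun a b => decide (g b < g a)) x l).Pairwise (fun a b => g b ≤ g a) := by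
  induction l with
  | nil => simp [PySem.List.insertBy]
  | cons y ys ih =>
    rw [List.pairwise_cons] at h
    obtain ⟨hy, hys⟩ := h
    rw [PySem.List.insertBy]
    by_cases hxy : g y < g x
    · rw [if_pos (by simpa using hxy)]
      refine List.Pairwise.cons ?_ (List.Pairwise.cons hy hys)
      intro b hb
      rcases List.mem_cons.mp hb with rfl | hb
      · exact le_of_lt hxy
      · exact le_trans (hy b hb) (le_of_lt hxy)
    · rw [if_neg (by simpa using hxy)]
      refine List.Pairwise.cons ?_ (ih hys)
      intro b hb
      rcases (PySem.List.mem_insertBy _ _ _ _).mp hb with rfl | hb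
      · exact le_of_not_gt hxy
      · exact hy b hb

theorem filter_insertBy {α : Type} (g : α → Int) (x : α) (l : List α) (v : Int)
    (h : l.Pairwise (fun a b => g b ≤ g a)) :
    (PySem.List.insertBy (fun a b => decide (g b < g a)) x l).filter (fun a => decide (g a = v)) =
      l.filter (fun a => decide (g a = v)) ++ (if g x = v then [x] else []) := by
  induction l with
  | nil =>
    rw [PySem.List.insertBy]
    by_cases h1 : g x = v <;> simp [List.filter, h1]
  | cons y ys ih =>
    rw [List.pairwise_cons] at h
    obtain ⟨hy, hys⟩ := h
    rw [PySem.List.insertBy]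
    by_cases hxy : g y < g x
    · rw [if_pos (by simpa using hxy)]
      by_cases hxv : g x = v
      · have hytail : ((y :: ys).filter (fun a => decide (g a = v))) = [] := by
          rw [List.filter_eq_nil_iff]
          intro a ha
          rcases List.mem_cons.mp ha with rfl | ha
          · simp; omega
          · have := hy a ha; simp; omega
        rw [List.filter_cons]
        rw [if_pos (by simp; omega)]
        rw [hytail, hxv]
        simp
      · rw [List.filter_cons]
        rw [if_neg (by simpa using hxv)]
        simp [hxv]
    · rw [if_neg (by simpa using hxy)]
      rw [List.filter_cons, List.filter_cons, ih hys]
      by_cases hyv : g y = v <;> simp [hyv]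

theorem filter_foldl_insertBy {α : Type} (g : α → Int) (v : Int) :
    ∀ (xs acc : List α), acc.Pairwise (fun a b => g b ≤ g a) →
    (xs.foldl (fun acc x => PySem.List.insertBy (fun a b => decide (g b < g a)) x acc) acc).filter
        (fun a => decide (g a = v)) =
      acc.filter (fun a => decide (g a = v)) ++ xs.filter (fun a => decide (g a = v)) := by
  intro xs
  induction xs with
  | nil => intro acc _; simp
  | cons x xs ih =>
    intro acc hacc
    rw [List.foldl_cons, ih _ (insertBy_pairwise_desc g x acc hacc), filter_insertBy g x acc v hacc,
      List.filter_cons]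
    by_cases hxv : g x = v <;> simp [hxv]

theorem filter_sorted_rev {α : Type} (g : α → Int) (xs : List α) (v : Int) :
    (PySem.List.sorted xs g true).filter (fun a => decide (g a = v)) =
      xs.filter (fun a => decide (g a = v)) := by
  rw [PySem.List.sorted_rev_eq_foldl_insertBy, filter_foldl_insertBy g v xs [] (by simp)]
  simp

theorem eq_of_pairwise_desc_filter {α : Type} (g : α → Int) :
    ∀ (ys zs : List α), ys.Pairwise (fun a b => g b ≤ g a) → zs.Pairwise (fun a b => g b ≤ g a) →
    (∀ v : Int, ys.filter (fun a => decide (g a = v)) = zs.filter (fun a => decide (g a = v))) →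
    ys = zs := by
  intro ys
  induction ys with
  | nil =>
    intro zs _ _ hf
    rcases zs with _ | ⟨z, zs⟩
    · rfl
    · have := hf (g z)
      simp [List.filter_cons] at this
  | cons y ys ih =>
    intro zs hys hzs hf
    rcases zs with _ | ⟨z, zs⟩
    · have := hf (g y)
      simp [List.filter_cons] at this
    · rw [List.pairwise_cons] at hys hzs
      obtain ⟨hy, hys'⟩ := hys
      obtain ⟨hz, hzs'⟩ := hzs
      -- g y = g z
      have hyz : g y = g z := by
        by_cases e : g z = g y
        · omega
        · exfalso
          have h1 := hf (g y)
          rw [List.filter_cons, List.filter_cons, if_pos (by simp), if_neg (by simpa using e)] at h1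
          have hym : y ∈ List.filter (fun a => decide (g a = g y)) zs := by
            rw [← h1]; exact List.mem_cons_self
          have h1' := hz y (List.mem_of_mem_filter hym)
          have h2 := hf (g z)
          rw [List.filter_cons, List.filter_cons, if_neg (by simp; omega), if_pos (by simp)] at h2
          have hzm : z ∈ List.filter (fun a => decide (g a = g z)) ys := by
            rw [h2]; exact List.mem_cons_self
          have h2' := hy z (List.mem_of_mem_filter hzm)
          omega
      have hhead := hf (g y)
      rw [List.filter_cons, List.filter_cons, if_pos (by simp), if_pos (by simp [hyz])] at hhead
      have hyzeq : y = z := List.head_eq_of_cons_eq hhead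
      subst hyzeq
      have htails : ∀ v : Int, ys.filter (fun a => decide (g a = v)) = zs.filter (fun a => decide (g a = v)) := by
        intro v
        have hv' := hf v
        rw [List.filter_cons, List.filter_cons] at hv'
        by_cases hv : g y = v
        · rw [if_pos (by simpa using hv), if_pos (by simpa using hv)] at hv'
          exact List.tail_eq_of_cons_eq hv'
        · rwa [if_neg (by simpa using hv), if_neg (by simpa using hv)] at hv'
      rw [ih zs hys' hzs' htails]


theorem flatMap_buckets_pairwise {α : Type} (g : α → Int) (r : List Int) (f : Int → List α)
    (hr : r.Pairwise (fun a b => b < a)) (hf : ∀ n ∈ r, ∀ k ∈ f n, g k = n) :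
    (r.flatMap f).Pairwise (fun a b => g b ≤ g a) := by
  induction r with
  | nil => simp
  | cons n r ih =>
    rw [List.pairwise_cons] at hr
    obtain ⟨hn, hr'⟩ := hr
    rw [List.flatMap_cons, List.pairwise_append]
    refine ⟨?_, ih hr' (fun m hm => hf m (List.mem_cons_of_mem _ hm)), ?_⟩
    · -- within bucket n all keys equal
      have hk : ∀ k ∈ f n, g k = n := hf n List.mem_cons_self
      exact List.pairwise_of_forall_mem_list (fun a ha b hb => by rw [hk a ha, hk b hb])
    · intro a ha b hb
      have ha' := hf n List.mem_cons_self a ha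
      rw [List.mem_flatMap] at hb
      obtain ⟨m, hm, hbm⟩ := hb
      have hb' := hf m (List.mem_cons_of_mem _ hm) b hbm
      have := hn m hm
      omega

theorem filter_flatMap_buckets {α : Type} (g : α → Int) (r : List Int) (f : Int → List α)
    (hr : r.Nodup) (hf : ∀ n ∈ r, ∀ k ∈ f n, g k = n) (v : Int) :
    (r.flatMap f).filter (fun a => decide (g a = v)) = if v ∈ r then f v else [] := by
  induction r with
  | nil => simp
  | cons n r ih =>
    rw [List.nodup_cons] at hr
    obtain ⟨hn, hr'⟩ := hr
    rw [List.flatMap_cons, List.filter_append,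
      ih hr' (fun m hm => hf m (List.mem_cons_of_mem _ hm))]
    by_cases hv : v = n
    · subst hv
      rw [if_pos List.mem_cons_self, if_neg hn]
      have : (f v).filter (fun a => decide (g a = v)) = f v := by
        rw [List.filter_eq_self]
        intro a ha
        simp [hf v List.mem_cons_self a ha]
      rw [this, List.append_nil]
    · have : (f n).filter (fun a => decide (g a = v)) = [] := by
        rw [List.filter_eq_nil_iff]
        intro a ha
        simp [hf n List.mem_cons_self a ha]
        omega
      rw [this, List.nil_append]
      by_cases hvr : v ∈ r
      · rw [if_pos hvr, if_pos (List.mem_cons_of_mem _ hvr)]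
      · rw [if_neg hvr, if_neg (by simp [hv, hvr])]

-- ===== VERDICT (by name: the statement is the Claim_ definition above) =====
theorem sort_by_dict_size_spec : Claim_equal_sort_by_dict_size := by
  intro inp0 _
  unfold Spec_sort_by_dict_size
  simp only [sort_by_dict_size, sort_by_dict_size_alt]
  set D : PySem.Dict String (List String) := PySem.Dict.ofList inp0 with hD
  set dA : PySem.Dict String Int :=
    D.keys.foldl (fun d key => d.insert key ((D.getD key []).length : Int)) PySem.Dict.empty with hdA
  set g : String → Int := fun k => dA.getD k 0 with hg
  -- nodup keys of the input dict
  have h_nd : D.keys.Nodup := PySem.Dict.nodup_keys_ofList inp0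
  -- dA's items
  have h_dA_items : dA.items = D.keys.map (fun k => (k, ((D.getD k []).length : Int))) := by
    rw [hdA]
    rw [PySem.Dict.items_foldl_insert_fresh D.keys (fun a => a)
      (fun key => ((D.getD key []).length : Int)) PySem.Dict.empty
      (fun a _ => PySem.Dict.contains_empty a) (by simpa using h_nd)]
    rfl
  have h_dA_keys : dA.keys = D.keys := by
    show dA.items.map (·.1) = D.keys
    rw [h_dA_items]; simp [Function.comp_def]
  have h_dA_nd : dA.keys.Nodup := by rw [h_dA_keys]; exact h_nd
  have h_g : ∀ k ∈ D.keys, g k = ((D.getD k []).length : Int) := by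
    intro k hk
    have hmem : (k, ((D.getD k []).length : Int)) ∈ dA.items := by
      rw [h_dA_items]; exact List.mem_map_of_mem hk
    exact PySem.Dict.getD_of_mem_items dA hmem h_dA_nd 0
  have h_g_nonneg : ∀ k ∈ D.keys, 0 ≤ g k := by
    intro k hk; rw [h_g k hk]; positivity
  rw [h_dA_keys]
  set S : List String := PySem.List.sorted D.keys g true with hS
  have hS_perm : S.Perm D.keys := PySem.List.sorted_perm D.keys g true
  have hS_nd : S.Nodup := hS_perm.nodup_iff.mpr h_nd
  -- d2
  have h_d2_items :
      (S.foldl (fun acc k => acc.insert k (g k)) PySem.Dict.empty).items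
        = S.map (fun k => (k, g k)) := by
    rw [PySem.Dict.items_foldl_insert_fresh S (fun a => a) g PySem.Dict.empty
      (fun a _ => PySem.Dict.contains_empty a) (by simpa using hS_nd)]
    rfl
  have h_d2_keys :
      (S.foldl (fun acc k => acc.insert k (g k)) PySem.Dict.empty).keys = S := by
    show (S.foldl (fun acc k => acc.insert k (g k)) PySem.Dict.empty).items.map (·.1) = S
    rw [h_d2_items]; simp [Function.comp_def]
  rw [h_d2_keys]
  -- ===== B side =====
  set m : (String × List String) → (Int × String) := fun kv => ((kv.2.length : Int), kv.1) with hm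
  set pairs : List (Int × String) := D.items.map m with hpairs
  have h_fold_pairs :
      D.items.foldl (fun b kv => b.modify ((kv.2.length : Int)) [] (fun l => l ++ [kv.1]))
          PySem.Dict.empty
        = pairs.foldl (fun b p => b.modify p.1 [] (fun l => l ++ [p.2])) PySem.Dict.empty := by
    rw [hpairs, List.foldl_map]
  rw [h_fold_pairs]
  set buckets : PySem.Dict Int (List String) :=
    pairs.foldl (fun b p => b.modify p.1 [] (fun l => l ++ [p.2])) PySem.Dict.empty with hbk
  -- each bucket
  have h_keys_eq_map : D.keys = D.items.map (·.1) := rfl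
  have h_getD_items : ∀ kv ∈ D.items, D.getD kv.1 [] = kv.2 := by
    intro kv hkv
    exact PySem.Dict.getD_of_mem_items D (by exact hkv) h_nd []
  have h_bucket : ∀ n : Int, buckets.getD n [] = D.keys.filter (fun k => decide (g k = n)) := by
    intro n
    rw [hbk, PySem.Dict.getD_foldl_modify_append pairs PySem.Dict.empty n]
    rw [PySem.Dict.getD_empty, List.nil_append, hpairs, List.filter_map, List.map_map]
    rw [h_keys_eq_map, List.filter_map]
    apply congrArg (List.map _)
    apply List.filter_congr
    intro kv hkv
    have h1 : g kv.1 = ((D.getD kv.1 []).length : Int) :=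
      h_g kv.1 (List.mem_map_of_mem hkv)
    rw [h_getD_items kv hkv] at h1
    simp only [hm, Function.comp, h1]
    exact (Bool.beq_eq_decide_eq _ _)
  -- bucket keys
  have h_mem_keysB : ∀ x : Int, x ∈ buckets.keys ↔ x ∈ D.keys.map g := by
    intro x
    rw [hbk, PySem.Dict.keys_foldl_modify_key pairs Prod.fst [] (fun d p l => l ++ [p.2])
      PySem.Dict.empty]
    rw [PySem.Dict.keys_empty]
    have : PySem.Set.update [] (pairs.map (·.1)) = PySem.Set.ofList (pairs.map (·.1)) := rfl
    rw [this, PySem.Set.mem_ofList]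
    rw [hpairs, List.map_map, h_keys_eq_map, List.map_map]
    constructor <;> intro hx <;>
      · rw [List.mem_map] at hx ⊢
        obtain ⟨kv, hkv, hkvx⟩ := hx
        refine ⟨kv, hkv, ?_⟩
        have h1 : g kv.1 = ((D.getD kv.1 []).length : Int) :=
          h_g kv.1 (List.mem_map_of_mem hkv)
        rw [h_getD_items kv hkv] at h1
        simp [hm, Function.comp, h1] at hkvx ⊢
        omega
  set top : Int := PySem.List.maxD buckets.keys (fun n => n) (-1) with htop
  have h_top_ub : ∀ n ∈ buckets.keys, n ≤ top := by
    intro n hn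
    rw [htop]
    unfold PySem.List.maxD
    cases hmax : PySem.List.max? buckets.keys (fun n => n) with
    | none => rw [PySem.List.max?_eq_none_iff] at hmax; rw [hmax] at hn; simp at hn
    | some mx => simpa using PySem.List.max?_isMax hmax n hn
  set r : List Int := PySem.List.pyRange top (-1) (-1) with hr
  have h_r_pairwise : r.Pairwise (fun a b => b < a) := by
    rw [hr, PySem.List.pyRange_neg_one_eq_reverse, List.pairwise_reverse]
    exact PySem.List.pairwise_lt_pyRange_one _ _
  have h_r_nodup : r.Nodup := by
    rw [hr, PySem.List.pyRange_neg_one_eq_reverse, List.nodup_reverse]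
    exact PySem.List.nodup_pyRange_one _ _
  have hfL : ∀ n ∈ r, ∀ k ∈ buckets.getD n [], g k = n := by
    intro n _ k hk
    rw [h_bucket n] at hk
    simpa using List.of_mem_filter hk
  -- fold over the range of inner folds is a fold over the flattened key list
  set L : List String := r.flatMap (fun n => buckets.getD n []) with hL
  have h_out :
      r.foldl (fun o n => (buckets.getD n []).foldl
          (fun o key => o.insert key (D.getD key [])) o) PySem.Dict.empty
        = L.foldl (fun o key => o.insert key (D.getD key [])) PySem.Dict.empty := by
    rw [hL, List.foldl_flatMap]
  rw [h_out]
  -- S = L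
  have h_filters : ∀ v : Int,
      S.filter (fun a => decide (g a = v)) = L.filter (fun a => decide (g a = v)) := by
    intro v
    rw [hS, filter_sorted_rev g D.keys v, hL,
      filter_flatMap_buckets g r _ h_r_nodup hfL v]
    by_cases hv : v ∈ r
    · rw [if_pos hv, h_bucket v]
    · rw [if_neg hv, List.filter_eq_nil_iff]
      intro k hk hgk
      simp only [decide_eq_true_eq] at hgk
      apply hv
      have h0 : 0 ≤ v := hgk ▸ h_g_nonneg k hk
      have hmem : v ∈ buckets.keys := by
        rw [h_mem_keysB]
        rw [← hgk]
        exact List.mem_map_of_mem hk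
      have := h_top_ub v hmem
      rw [hr, PySem.List.mem_pyRange_neg_one]
      omega
  have hSL : S = L :=
    eq_of_pairwise_desc_filter g S L
      (PySem.List.sorted_pairwise_rev D.keys g)
      (flatMap_buckets_pairwise g r _ h_r_pairwise hfL)
      h_filters
  rw [← hSL]
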